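-- pv_equiv track=rewrite | github.com/venzino-han/rl4rec | src/utils/common.py | filter_interactions
-- ===== SOURCE A (Python) =====
-- def filter_interactions(interactions):
--     """
--     Filter the interactions list to keep only the interactions up to the most recent high-rating interaction.
--     Last interaction rating should be 4 or higher.
--     """
--     last_high_rating_index = None
--     for i in range(len(interactions)-1, -1, -1):
--         if interactions[i]['rating'] >= 4:
--             last_high_rating_index = i+1
--             break
--
--     # Return interactions up to the last high-rating interaction
--     if last_high_rating_index is not None:
--         return interactions[:last_high_rating_index]
--     else:
--         return []
-- ===== SOURCE B (Python) =====
-- def filter_interactions(interactions):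
--     highs = [i for i, d in enumerate(interactions) if d['rating'] >= 4]
--     return interactions[:highs[-1] + 1] if highs else []
-- ===== Notes on version B (the rewrite author's own statement) =====
-- stated objective: idiomatic
-- what changed: Replaces the reverse early-break index loop with one forward pass that collects all high-rating indices and slices up to the last one.
-- outside the precondition, e.g. on filter_interactions([{'x': 1}, {'rating': 5}]): A returns [{'x': 1}, {'rating': 5}], B raises KeyError
import Mathlib
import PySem

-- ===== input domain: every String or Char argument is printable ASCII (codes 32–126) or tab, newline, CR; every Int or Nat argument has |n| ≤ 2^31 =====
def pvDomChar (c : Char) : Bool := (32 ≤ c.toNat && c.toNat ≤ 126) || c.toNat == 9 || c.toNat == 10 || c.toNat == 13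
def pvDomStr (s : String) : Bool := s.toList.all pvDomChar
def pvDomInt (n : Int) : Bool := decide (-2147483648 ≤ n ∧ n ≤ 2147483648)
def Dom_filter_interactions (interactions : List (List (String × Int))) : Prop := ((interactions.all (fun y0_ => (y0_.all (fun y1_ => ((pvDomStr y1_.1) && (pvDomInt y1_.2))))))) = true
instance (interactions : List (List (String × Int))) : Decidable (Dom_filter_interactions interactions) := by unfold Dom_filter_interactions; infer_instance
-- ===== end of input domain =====

-- B replaces A's reverse early-break scan by one forward pass that collects all
-- high-rating indices and slices up to the last one (idiomatic decomposition).


-- ===== PORT A =====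
-- the loop 'for i in range(len(interactions)-1, -1, -1)' with break, as structural
-- recursion on the number of indices still to visit (fuel k visits index k-1 next);
-- a KeyError (Dict.get? = none) makes the helper return none (outside Pre_).
def fiLoopA (interactions : List (List (String × Int))) : Nat → Option Int
  | 0 => none
  | k + 1 =>
    match PySem.Dict.get? (PySem.Dict.mk (interactions.getD k [])) "rating" with
    | some r => if 4 ≤ r then some ((k : Int) + 1) else fiLoopA interactions k
    | none => none

def filter_interactions (interactions : List (List (String × Int))) : List (List (String × Int)) :=
  match fiLoopA interactions interactions.length with
  | some m => PySem.List.slice interactions none (some m)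
  | none => []

-- ===== PORT B =====
-- highs = [i for i, d in enumerate(interactions) if d['rating'] >= 4]
-- (a missing 'rating' key is a KeyError: Dict.get? = none; such inputs are outside Pre_)
def filter_interactions_alt (interactions : List (List (String × Int))) : List (List (String × Int)) :=
  let highs : List Int :=
    (PySem.List.enumerate interactions 0).filterMap
      (fun p => match PySem.Dict.get? (PySem.Dict.mk p.2) "rating" with
                | some r => if (4 : Int) ≤ r then some p.1 else none
                | none => none)
  match highs.getLast? with
  | some i => PySem.List.slice interactions none (some (i + 1))
  | none => []

-- ===== PRECONDITION & SPEC =====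
-- Pre_ excludes inputs where some interaction lacks a 'rating' key: A's reverse scan raises
-- KeyError there unless a later interaction happens to have rating >= 4 (in which case A
-- returns), while B's full forward scan raises KeyError on every such input.
def Pre_filter_interactions (interactions : List (List (String × Int))) : Prop :=
  ∀ i ∈ List.range interactions.length,
    (PySem.Dict.get? (PySem.Dict.mk (interactions.getD i [])) "rating").isSome = true
instance (interactions : List (List (String × Int))) : Decidable (Pre_filter_interactions interactions) := by unfold Pre_filter_interactions; infer_instance

def pvWitness_filter_interactions : (List (List (String × Int))) :=
  [[("rating", 5), ("x", 1)], [("rating", 2)]]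

def Spec_filter_interactions (interactions : List (List (String × Int))) (out : List (List (String × Int))) : Prop := out = filter_interactions_alt interactions
instance (interactions : List (List (String × Int))) (out : List (List (String × Int))) : Decidable (Spec_filter_interactions interactions out) := by unfold Spec_filter_interactions; infer_instance

-- ===== CLAIM (what is proved, stated in full; the proofs are below) =====
def Claim_equal_filter_interactions : Prop := ∀ (interactions : List (List (String × Int))), Dom_filter_interactions interactions → Pre_filter_interactions interactions → Spec_filter_interactions interactions (filter_interactions interactions)

-- ===== LEMMAS AND PROOFS =====

-- the common "last high-rating index" specification (proof-side only)
def fiHigh (interactions : List (List (String × Int))) (i : Nat) : Bool :=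
  decide (4 ≤ PySem.Dict.getD (PySem.Dict.mk (interactions.getD i [])) "rating" 0)

def fiRes (xs : List (List (String × Int))) : List (List (String × Int)) :=
  match ((List.range xs.length).filter (fiHigh xs)).getLast? with
  | some i => PySem.List.slice xs none (some ((i : Int) + 1))
  | none => []

theorem fiHigh_of_some {xs : List (List (String × Int))} {i : Nat} {r : Int}
    (h : PySem.Dict.get? (PySem.Dict.mk (xs.getD i [])) "rating" = some r) :
    fiHigh xs i = decide (4 ≤ r) := by
  simp only [fiHigh, PySem.Dict.getD, h, Option.getD_some]

theorem fiLoopA_spec (xs : List (List (String × Int))) :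
    ∀ k, k ≤ xs.length →
    (∀ j, k ≤ j → j < xs.length → fiHigh xs j = false) →
    Pre_filter_interactions xs →
    fiLoopA xs k = (((List.range k).filter (fiHigh xs)).getLast?).map (fun i => (i : Int) + 1) := by
  intro k
  induction k with
  | zero => intro _ _ _; simp [fiLoopA]
  | succ k ih =>
    intro hk habove hpre
    have hkl : k < xs.length := by omega
    cases hg : PySem.Dict.get? (PySem.Dict.mk (xs.getD k [])) "rating" with
    | some r =>
      have hunf : fiLoopA xs (k + 1) =
          (if 4 ≤ r then some ((k : Int) + 1) else fiLoopA xs k) := by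
        simp only [fiLoopA, hg]
      by_cases hr : 4 ≤ r
      · have hh : fiHigh xs k = true := by rw [fiHigh_of_some hg]; simpa using hr
        rw [hunf, if_pos hr]
        simp [List.range_succ, List.filter_append, hh]
      · have hh : fiHigh xs k = false := by rw [fiHigh_of_some hg]; simpa using hr
        rw [hunf, if_neg hr, ih (by omega) (by
          intro j hj1 hj2
          rcases Nat.eq_or_lt_of_le hj1 with h | h
          · exact h ▸ hh
          · exact habove j (by omega) hj2) hpre]
        simp [List.range_succ, List.filter_append, hh]
    | none =>
      -- impossible under Pre_: every index has the 'rating' key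
      exfalso
      have := hpre k (by simpa using hkl)
      rw [hg] at this
      simp at this

theorem portA_eq (xs : List (List (String × Int))) (hpre : Pre_filter_interactions xs) :
    filter_interactions xs = fiRes xs := by
  unfold filter_interactions fiRes
  rw [fiLoopA_spec xs xs.length (le_refl _) (by intro j h1 h2; omega) hpre]
  cases ((List.range xs.length).filter (fiHigh xs)).getLast? <;> rfl

theorem filterMap_if_some {α β : Type} (p : α → Prop) [DecidablePred p] (f : α → β)
    (l : List α) :
    l.filterMap (fun x => if p x then some (f x) else none)
      = (l.filter (fun x => decide (p x))).map f := by
  induction l with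
  | nil => rfl
  | cons a l ih => by_cases h : p a <;> simp [h, ih]

theorem portB_eq (xs : List (List (String × Int))) (hpre : Pre_filter_interactions xs) :
    filter_interactions_alt xs = fiRes xs := by
  unfold filter_interactions_alt fiRes
  rw [PySem.List.enumerate_eq_map_pyRange xs ([] : List (String × Int)), List.filterMap_map,
    PySem.List.pyRange_one, List.filterMap_map]
  simp only [PySem.List.len]
  have hlen : (((xs.length : Int) - 0)).toNat = xs.length := by omega
  rw [hlen]
  have hcongr : (List.range xs.length).filterMap
      ((((fun p : Int × List (String × Int) =>
          match PySem.Dict.get? (PySem.Dict.mk p.2) "rating" with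
          | some r => if (4 : Int) ≤ r then some p.1 else none
          | none => none) ∘
        (fun j => (j, PySem.List.pyGetD xs j ([] : List (String × Int))))) ∘
        (fun k : Nat => (0 : Int) + (k : Int))))
      = (List.range xs.length).filterMap
        (fun k : Nat =>
          if 4 ≤ PySem.Dict.getD (PySem.Dict.mk (xs.getD k [])) "rating" 0
          then some ((k : Int)) else none) := by
    apply List.filterMap_congr
    intro k hk
    have hkl : k < xs.length := List.mem_range.mp hk
    have hsome := hpre k hk
    cases hg : PySem.Dict.get? (PySem.Dict.mk (xs.getD k [])) "rating" with
    | none => rw [hg] at hsome; simp at hsome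
    | some r =>
      have hgetD : PySem.Dict.getD (PySem.Dict.mk (xs.getD k [])) "rating" 0 = r := by
        simp only [PySem.Dict.getD, hg, Option.getD_some]
      simp only [List.getD_eq_getElem?_getD] at hg hgetD
      simp [Function.comp, PySem.List.pyGetD_natCast, hg, hgetD]
  rw [hcongr, filterMap_if_some
    (fun k : Nat => 4 ≤ PySem.Dict.getD (PySem.Dict.mk (xs.getD k [])) "rating" 0)
    (fun k : Nat => (k : Int))]
  have hfil : (List.range xs.length).filter
      (fun k => decide (4 ≤ PySem.Dict.getD (PySem.Dict.mk (xs.getD k [])) "rating" 0))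
      = (List.range xs.length).filter (fiHigh xs) := rfl
  rw [hfil, List.getLast?_map]
  cases ((List.range xs.length).filter (fiHigh xs)).getLast? <;> rfl

-- ===== VERDICT (by name: the statement is the Claim_ definition above) =====
theorem filter_interactions_spec : Claim_equal_filter_interactions := by
  intro xs _ hpre
  unfold Spec_filter_interactions
  rw [portA_eq xs hpre, portB_eq xs hpre]
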